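-- pv_equiv track=rewrite | github.com/FFKatahiraT/requester-answerer_model | ex3.py | error_analyzer
-- ===== SOURCE A (Python) =====
-- def error_analyzer(codes, recv_time):
-- 	True_signals = 0
-- 	target_loss = 0
-- 	for code_time in codes:	#Подсчитываем кол-во ошибок
-- 		if code_time in recv_time:
-- 			True_signals += 1
-- 		else:
-- 			target_loss +=1
-- 	Q_errors = len(recv_time) - True_signals if len(recv_time)>len(codes) else len(codes) - True_signals	#Ошибки
-- 	False_signals = Q_errors - target_loss	#Ложные срабатывания
-- 	return False_signals, target_loss
-- ===== SOURCE B (Python) =====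
-- def error_analyzer(codes, recv_time):
--     # Sort the codes and the distinct received times, then count matches with a
--     # single two-pointer merge scan instead of a membership test per code.
--     sc = sorted(codes)
--     sr = sorted(set(recv_time))
--     matched = 0
--     j = 0
--     n = len(sr)
--     for c in sc:
--         while j < n and sr[j] < c:
--             j += 1
--         if j < n and sr[j] == c:
--             matched += 1
--     return max(len(recv_time) - len(codes), 0), len(codes) - matched
-- ===== Notes on version B (the rewrite author's own statement) =====
-- stated objective: faster
-- what changed: B sorts the codes and the distinct received times and counts matched codes in a single two-pointer merge pass (plus closed forms for the two outputs), replacing A's per-code linear membership scan, the Q_errors conditional and the final subtraction.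
import Mathlib
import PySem

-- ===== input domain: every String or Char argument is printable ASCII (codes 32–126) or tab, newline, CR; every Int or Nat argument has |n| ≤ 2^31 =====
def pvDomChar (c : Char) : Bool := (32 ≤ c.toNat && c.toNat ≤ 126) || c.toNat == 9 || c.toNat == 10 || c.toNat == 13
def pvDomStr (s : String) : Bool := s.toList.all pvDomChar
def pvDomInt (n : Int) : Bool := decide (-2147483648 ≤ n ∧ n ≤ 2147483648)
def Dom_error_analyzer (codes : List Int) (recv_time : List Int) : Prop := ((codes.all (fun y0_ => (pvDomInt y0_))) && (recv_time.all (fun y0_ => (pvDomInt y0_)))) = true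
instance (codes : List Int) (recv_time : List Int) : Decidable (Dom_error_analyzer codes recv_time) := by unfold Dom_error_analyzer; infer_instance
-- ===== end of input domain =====

-- B replaces the per-code membership scan by sorting codes and the distinct received
-- times and counting matches with one two-pointer merge pass; objective: faster on
-- large inputs (O((n+m) log(n+m)) vs O(n*m)), measured.


-- ===== PORT A =====
-- Port of A: fold carrying (True_signals, target_loss), then Q_errors and the subtraction.
def error_analyzer (codes : List Int) (recv_time : List Int) : Int × Int :=
  let tl := codes.foldl
    (fun (s : Int × Int) code_time =>
      if recv_time.contains code_time then (s.1 + 1, s.2) else (s.1, s.2 + 1))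
    (0, 0)
  let Q_errors : Int :=
    if (recv_time.length : Int) > (codes.length : Int) then
      (recv_time.length : Int) - tl.1
    else
      (codes.length : Int) - tl.1
  (Q_errors - tl.2, tl.2)

-- ===== PORT B =====
-- Port of B: sort codes and the distinct recv times, two-pointer merge counting matches.
-- The loop state keeps the remaining suffix sr[j:] of sr in place of the index j;
-- the inner `while j < n and sr[j] < c: j += 1` is exactly `dropWhile (· < c)` on that suffix,
-- and `j < n and sr[j] == c` is exactly `head? = some c`.
def error_analyzer_alt (codes : List Int) (recv_time : List Int) : Int × Int :=
  let sc := PySem.List.sorted codes (fun x => x) false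
  let sr := PySem.List.sorted (PySem.Set.ofList recv_time) (fun x => x) false
  let res := sc.foldl
    (fun (s : List Int × Int) c =>
      let rem := s.1.dropWhile (fun r => decide (r < c))
      if rem.head? = some c then (rem, s.2 + 1) else (rem, s.2))
    (sr, 0)
  (max ((recv_time.length : Int) - (codes.length : Int)) 0,
   (codes.length : Int) - res.2)

-- ===== PRECONDITION & SPEC =====
def Spec_error_analyzer (codes : List Int) (recv_time : List Int) (out : Int × Int) : Prop := out = error_analyzer_alt codes recv_time
instance (codes : List Int) (recv_time : List Int) (out : Int × Int) : Decidable (Spec_error_analyzer codes recv_time out) := by unfold Spec_error_analyzer; infer_instance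

-- ===== CLAIM (what is proved, stated in full; the proofs are below) =====
def Claim_equal_error_analyzer : Prop := ∀ (codes : List Int) (recv_time : List Int), Dom_error_analyzer codes recv_time → Spec_error_analyzer codes recv_time (error_analyzer codes recv_time)

-- ===== LEMMAS AND PROOFS =====

-- A's fold characterised: matched and unmatched counts of codes.
theorem foldA_char (recv codes : List Int) (t l : Int) :
    codes.foldl
      (fun (s : Int × Int) c =>
        if recv.contains c then (s.1 + 1, s.2) else (s.1, s.2 + 1)) (t, l)
      = (t + (codes.countP (fun c => recv.contains c) : Int),
         l + (codes.countP (fun c => !recv.contains c) : Int)) := by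
  induction codes generalizing t l with
  | nil => simp
  | cons c cs ih =>
    simp only [List.foldl, List.countP_cons]
    by_cases h : recv.contains c
    · rw [if_pos h, ih]
      simp only [h, if_true, Bool.not_true, Bool.false_eq_true, if_false, Prod.mk.injEq]
      constructor <;> push_cast <;> ring
    · rw [if_neg h, ih]
      have h' : recv.contains c = false := by simpa using h
      simp only [h', Bool.false_eq_true, if_false, Bool.not_false, if_true, Prod.mk.injEq]
      constructor <;> push_cast <;> ring

-- the head of a dropWhile does not satisfy the predicate
theorem head?_dropWhile_false (p : Int → Bool) (l : List Int) (x : Int)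
    (h : (l.dropWhile p).head? = some x) : p x = false := by
  induction l with
  | nil => simp at h
  | cons a t ih =>
    by_cases hp : p a
    · simp [hp] at h; exact ih h
    · simp [hp] at h; subst h; simpa using hp

-- on a strictly increasing list, the while loop lands exactly on c iff c occurs
theorem head?_dropWhile_iff_mem (sr : List Int) (c : Int)
    (hsr : sr.Pairwise (· < ·)) :
    ((sr.dropWhile (fun r => decide (r < c))).head? = some c) ↔ c ∈ sr := by
  constructor
  · intro h
    have hne : sr.dropWhile (fun r => decide (r < c)) ≠ [] := by
      intro he; rw [he] at h; simp at h
    have : c ∈ sr.dropWhile (fun r => decide (r < c)) := by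
      cases he : sr.dropWhile (fun r => decide (r < c)) with
      | nil => exact absurd he hne
      | cons a t => rw [he] at h; simp at h; simp [h]
    exact (List.dropWhile_sublist _).subset this
  · intro hc
    have hsplit := List.takeWhile_append_dropWhile (p := fun r => decide (r < c)) (l := sr)
    have hmem : c ∈ sr.dropWhile (fun r => decide (r < c)) := by
      rcases (show
        c ∈ sr.takeWhile (fun r => decide (r < c)) ++ sr.dropWhile (fun r => decide (r < c))
        by rw [hsplit]; exact hc)
        |> List.mem_append.mp with h1 | h2
      · have := List.mem_takeWhile_imp h1; simp at this
      · exact h2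
    cases he : sr.dropWhile (fun r => decide (r < c)) with
    | nil => rw [he] at hmem; simp at hmem
    | cons a t =>
      rw [he] at hmem
      have hhead : ¬ a < c := by
        have := head?_dropWhile_false (fun r => decide (r < c)) sr a (by rw [he]; rfl)
        simpa using this
      have hpw : (a :: t).Pairwise (fun x y : Int => x < y) := by
        rw [← he]; exact hsr.sublist (List.dropWhile_sublist _)
      rcases List.mem_cons.mp hmem with h1 | h2
      · simp [h1]
      · have := (List.pairwise_cons.mp hpw).1 c h2; omega

-- a later code c' ≥ c occurs in sr iff it occurs in the suffix left after the while loop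
theorem mem_dropWhile_iff_of_le (sr : List Int) (c c' : Int) (hle : c ≤ c') :
    (c' ∈ sr.dropWhile (fun r => decide (r < c))) ↔ c' ∈ sr := by
  constructor
  · intro h; exact (List.dropWhile_sublist _).subset h
  · intro h
    have hsplit := List.takeWhile_append_dropWhile (p := fun r => decide (r < c)) (l := sr)
    rcases (show
      c' ∈ sr.takeWhile (fun r => decide (r < c)) ++ sr.dropWhile (fun r => decide (r < c))
      by rw [hsplit]; exact h)
      |> List.mem_append.mp with h1 | h2
    · have := List.mem_takeWhile_imp h1; simp at this; omega
    · exact h2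

-- B's merge loop counts the codes that occur among the distinct received times.
theorem loopB (sc : List Int) (sr : List Int) (m : Int)
    (hsc : sc.Pairwise (· ≤ ·)) (hsr : sr.Pairwise (· < ·)) :
    (sc.foldl
      (fun (s : List Int × Int) c =>
        let rem := s.1.dropWhile (fun r => decide (r < c))
        if rem.head? = some c then (rem, s.2 + 1) else (rem, s.2))
      (sr, m)).2
    = m + (sc.countP (fun c => decide (c ∈ sr)) : Int) := by
  induction sc generalizing sr m with
  | nil => simp
  | cons c cs ih =>
    have hcs : cs.Pairwise (· ≤ ·) := (List.pairwise_cons.mp hsc).2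
    have hle : ∀ c' ∈ cs, c ≤ c' := (List.pairwise_cons.mp hsc).1
    have hrem : (sr.dropWhile (fun r => decide (r < c))).Pairwise (· < ·) :=
      hsr.sublist (List.dropWhile_sublist _)
    have hcount : cs.countP (fun c' => decide (c' ∈ sr.dropWhile (fun r => decide (r < c))))
        = cs.countP (fun c' => decide (c' ∈ sr)) := by
      refine List.countP_congr (fun x hx => ?_)
      simp only [decide_eq_true_eq]
      exact mem_dropWhile_iff_of_le sr c x (hle x hx)
    simp only [List.foldl, List.countP_cons]
    by_cases hc : c ∈ sr
    · rw [if_pos ((head?_dropWhile_iff_mem sr c hsr).mpr hc)]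
      rw [ih _ _ hcs hrem, hcount]
      simp [hc]; ring
    · rw [if_neg (fun h => hc ((head?_dropWhile_iff_mem sr c hsr).mp h))]
      rw [ih _ _ hcs hrem, hcount]
      simp [hc]

-- ===== VERDICT (by name: the statement is the Claim_ definition above) =====
theorem error_analyzer_spec : Claim_equal_error_analyzer := by
  intro codes recv _
  have h1 : (PySem.List.sorted codes (fun x => x) false).Pairwise (· ≤ ·) := by
    simpa using PySem.List.sorted_pairwise (xs := codes) (key := fun x => x)
  have h2 := PySem.List.sorted_ofList_pairwise_lt recv
  have hB := loopB (PySem.List.sorted codes (fun x => x) false)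
    (PySem.List.sorted (PySem.Set.ofList recv) (fun x => x) false) 0 h1 h2
  have hperm : (PySem.List.sorted codes (fun x => x) false).Perm codes :=
    PySem.List.sorted_perm codes (fun x => x) false
  have hcnt : (PySem.List.sorted codes (fun x => x) false).countP
        (fun c => decide (c ∈ PySem.List.sorted (PySem.Set.ofList recv) (fun x => x) false))
      = codes.countP (fun c => recv.contains c) := by
    rw [hperm.countP_eq]
    refine List.countP_congr (fun x hx => ?_)
    simp [PySem.List.mem_sorted, PySem.Set.mem_ofList]
  have hlen : codes.length = codes.countP (fun c => recv.contains c)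
      + codes.countP (fun c => !recv.contains c) := by
    have := List.length_eq_countP_add_countP (p := fun c => recv.contains c) (l := codes)
    convert this using 3
    funext a; simp
  unfold Spec_error_analyzer error_analyzer error_analyzer_alt
  simp only [foldA_char, hB, hcnt, Prod.mk.injEq]
  set a := codes.countP (fun c => recv.contains c) with ha
  set b := codes.countP (fun c => !recv.contains c) with hb
  have hlen' : codes.length = a + b := hlen
  split_ifs with h <;> constructor <;> omega
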